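-- pv_equiv track=rewrite | github.com/akashvshroff/Puzzles_Challenges | different_summands.py | optimal_summands
-- ===== SOURCE A (Python) =====
-- def optimal_summands(n):
--     """
--     Given n, find the largest pairwise distinct integer partition. Here largest
--     indicates number of terms in the partition.
--     """
--     summands = []
--     k = n
--     l = 1
--     while k > 0:
--         if k <= 2*l:
--             summands.append(k)
--             k -= k
--         else:
--             summands.append(l)
--             k -= l
--         l += 1
--     return summands
-- ===== SOURCE B (Python) =====
-- def optimal_summands(n):
--     # Closed-form count: largest m with m(m+1)/2 <= n, then range plus remainder.
--     if n <= 0: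
--         return []
--     m = 1
--     while (m + 1) * (m + 2) // 2 <= n:
--         m += 1
--     return list(range(1, m)) + [n - (m - 1) * m // 2]
-- ===== Notes on version B (the rewrite author's own statement) =====
-- stated objective: simpler
-- what changed: B first computes the count m of summands (largest m with the m-th triangular number at most n) and then emits range(1,m) plus a single remainder term, instead of A's loop that accumulates summands one by one and dumps the whole residue once it is at most twice the next candidate.
import Mathlib
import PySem

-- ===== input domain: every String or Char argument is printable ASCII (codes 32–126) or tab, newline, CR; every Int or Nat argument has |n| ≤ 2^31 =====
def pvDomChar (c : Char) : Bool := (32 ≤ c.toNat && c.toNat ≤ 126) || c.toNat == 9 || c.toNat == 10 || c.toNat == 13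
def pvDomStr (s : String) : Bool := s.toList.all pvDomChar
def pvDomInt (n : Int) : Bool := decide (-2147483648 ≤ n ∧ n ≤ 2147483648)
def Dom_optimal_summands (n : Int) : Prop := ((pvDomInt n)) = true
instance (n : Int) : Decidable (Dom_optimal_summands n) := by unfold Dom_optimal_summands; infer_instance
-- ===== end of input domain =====

-- B computes the number of summands first and emits a range plus a remainder term,
-- instead of A's accumulate-and-dump loop: simpler structure, same O(sqrt n) cost.


-- ===== PORT A =====
-- A's while loop, fueled (fuel n.toNat + 1 always suffices: each iteration with
-- l ≥ 1 strictly decreases k, which starts at n).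
def pvLoopA : Nat → Int → Int → List Int
  | 0, _, _ => []
  | fuel + 1, k, l =>
    if k > 0 then
      if k ≤ 2 * l then [k]
      else l :: pvLoopA fuel (k - l) (l + 1)
    else []

def optimal_summands (n : Int) : List Int := pvLoopA (n.toNat + 1) n 1

-- ===== PORT B =====
-- B's counting while loop, fueled likewise.
def pvCountM : Nat → Int → Int → Int
  | 0, _, m => m
  | fuel + 1, n, m =>
    if PySem.Int.floordiv ((m + 1) * (m + 2)) 2 ≤ n then pvCountM fuel n (m + 1)
    else m

def optimal_summands_alt (n : Int) : List Int :=
  if n ≤ 0 then []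
  else
    let m := pvCountM (n.toNat + 1) n 1
    PySem.List.pyRange 1 m 1 ++ [n - PySem.Int.floordiv ((m - 1) * m) 2]

-- ===== PRECONDITION & SPEC =====
def Spec_optimal_summands (n : Int) (out : List Int) : Prop := out = optimal_summands_alt n
instance (n : Int) (out : List Int) : Decidable (Spec_optimal_summands n out) := by unfold Spec_optimal_summands; infer_instance

-- ===== CLAIM (what is proved, stated in full; the proofs are below) =====
def Claim_equal_optimal_summands : Prop := ∀ (n : Int), Dom_optimal_summands n → Spec_optimal_summands n (optimal_summands n)

-- ===== LEMMAS AND PROOFS =====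

-- (a-1)*a is even and nonnegative, so floor division by 2 is exact.
lemma pvTri_two_mul (a : Int) : 2 * PySem.Int.floordiv ((a - 1) * a) 2 = (a - 1) * a := by
  have hnn : 0 ≤ (a - 1) * a := by nlinarith [sq_nonneg (2 * a - 1)]
  have hev : (a - 1) * a % 2 = 0 := by
    have := Int.even_mul_succ_self (a - 1)
    simpa [Int.even_iff, sub_add_cancel] using this
  rw [PySem.Int.floordiv_eq_ediv_of_pos (by norm_num)]
  omega

lemma pvCountM_ge (fuel : Nat) : ∀ (n m : Int), m ≤ pvCountM fuel n m := by
  induction fuel with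
  | zero => intro n m; simp [pvCountM]
  | succ f ih =>
    intro n m
    simp only [pvCountM]
    split
    · exact le_trans (by omega) (ih n (m + 1))
    · exact le_rfl

lemma pvKey (fuel : Nat) : ∀ (n l : Int), 1 ≤ l → l * (l + 1) ≤ 2 * n →
    (n - PySem.Int.floordiv ((l - 1) * l) 2).toNat < fuel →
    pvLoopA fuel (n - PySem.Int.floordiv ((l - 1) * l) 2) l
      = PySem.List.pyRange l (pvCountM fuel n l) 1
        ++ [n - PySem.Int.floordiv ((pvCountM fuel n l - 1) * pvCountM fuel n l) 2] := by
  induction fuel with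
  | zero => intro n l _ _ hf; omega
  | succ f ih =>
    intro n l hl hle hf
    have htl := pvTri_two_mul l
    have htl1 := pvTri_two_mul (l + 1)
    have hA : (l - 1) * l = l * (l + 1) - 2 * l := by ring
    have hC : (l + 1 - 1) * (l + 1) = (l - 1) * l + 2 * l := by ring
    have h2' : 2 * PySem.Int.floordiv ((l + 1) * (l + 2)) 2 = (l + 1) * (l + 2) := by
      rw [show (l + 1) * (l + 2) = (l + 2 - 1) * (l + 2) from by ring]
      exact pvTri_two_mul (l + 2)
    have hB : (l + 1) * (l + 2) = (l - 1) * l + 4 * l + 2 := by ring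
    set k := n - PySem.Int.floordiv ((l - 1) * l) 2 with hk
    have hkl : l ≤ k := by omega
    have hkpos : 0 < k := by omega
    by_cases hstop : k ≤ 2 * l
    · -- A dumps k; B's counter stops at l
      have hcond : ¬ PySem.Int.floordiv ((l + 1) * (l + 2)) 2 ≤ n := by omega
      have hcm0 : pvCountM (f + 1) n l = l := by
        simp only [pvCountM]; rw [if_neg hcond]
      have hla0 : pvLoopA (f + 1) k l = [k] := by
        simp only [pvLoopA]; rw [if_pos hkpos, if_pos hstop]
      rw [hla0, hcm0, PySem.List.pyRange_one_eq_nil le_rfl]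
      simpa using hk
    · -- A emits l and recurses; B's counter steps
      have hev : ((l + 1) * (l + 2)) % 2 = 0 := by
        have h := Int.even_mul_succ_self (l + 1)
        rw [show l + 1 + 1 = l + 2 from by ring] at h
        simpa [Int.even_iff] using h
      have hcond : PySem.Int.floordiv ((l + 1) * (l + 2)) 2 ≤ n := by omega
      have hle' : (l + 1) * (l + 1 + 1) ≤ 2 * n := by
        have h : (l + 1) * (l + 1 + 1) = (l + 1) * (l + 2) := by ring
        omega
      have hk' : k - l = n - PySem.Int.floordiv ((l + 1 - 1) * (l + 1)) 2 := by omega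
      have hrec := ih n (l + 1) (by omega) hle' (by omega)
      rw [← hk'] at hrec
      have hM := pvCountM_ge f n (l + 1)
      have hcm : pvCountM (f + 1) n l = pvCountM f n (l + 1) := by
        simp only [pvCountM]; rw [if_pos hcond]
      have hla : pvLoopA (f + 1) k l = l :: pvLoopA f (k - l) (l + 1) := by
        simp only [pvLoopA]; rw [if_pos hkpos, if_neg hstop]
      rw [hla, hcm, hrec, PySem.List.pyRange_one_cons (by omega : l < pvCountM f n (l + 1))]
      simp

-- ===== VERDICT (by name: the statement is the Claim_ definition above) =====
theorem optimal_summands_spec : Claim_equal_optimal_summands := by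
  intro n _
  unfold Spec_optimal_summands optimal_summands optimal_summands_alt
  by_cases hn : n ≤ 0
  · have : n.toNat = 0 := by omega
    simp [this, pvLoopA, hn]
  · have h1 : (1 : Int) * (1 + 1) ≤ 2 * n := by omega
    have h0 : PySem.Int.floordiv ((1 - 1) * 1) 2 = 0 := by
      have := pvTri_two_mul 1; omega
    have hf : (n - PySem.Int.floordiv (((1 : Int) - 1) * 1) 2).toNat < n.toNat + 1 := by
      rw [h0]; omega
    have := pvKey (n.toNat + 1) n 1 le_rfl h1 hf
    rw [h0] at this
    simpa [hn] using this
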